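-- pv_equiv track=rewrite | github.com/arpe-io/fasttransfer-mcp | src/fasttransfer.py | mask_password
-- ===== SOURCE A (Python) =====
-- from typing import Dict, List, Optional, Tuple
--
-- def mask_password(command: List[str]) -> List[str]:
--     """
--     Create a copy of command with passwords masked.
--
--     Args:
--         command: Command list to mask
--
--     Returns:
--         Command list with passwords replaced by '******'
--     """
--     masked = []
--     mask_next = False
--
--     for part in command:
--         if mask_next:
--             masked.append("******")
--             mask_next = False
--         else:
--             if part in ["--sourcepassword", "--targetpassword", "-x", "-X"]:
--                 mask_next = True
--             masked.append(part)
--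
--     return masked
-- ===== SOURCE B (Python) =====
-- def mask_password(command):
--     masked = []
--     i = 0
--     n = len(command)
--     while i < n:
--         part = command[i]
--         masked.append(part)
--         if part in ("--sourcepassword", "--targetpassword", "-x", "-X") and i + 1 < n:
--             masked.append("******")
--             i += 2
--         else:
--             i += 1
--     return masked
-- ===== Notes on version B (the rewrite author's own statement) =====
-- stated objective: alternative
-- what changed: Replaces the boolean mask_next state flag with an index-driven while loop that consumes a flag and its password value together in one step.
import Mathlib
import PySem

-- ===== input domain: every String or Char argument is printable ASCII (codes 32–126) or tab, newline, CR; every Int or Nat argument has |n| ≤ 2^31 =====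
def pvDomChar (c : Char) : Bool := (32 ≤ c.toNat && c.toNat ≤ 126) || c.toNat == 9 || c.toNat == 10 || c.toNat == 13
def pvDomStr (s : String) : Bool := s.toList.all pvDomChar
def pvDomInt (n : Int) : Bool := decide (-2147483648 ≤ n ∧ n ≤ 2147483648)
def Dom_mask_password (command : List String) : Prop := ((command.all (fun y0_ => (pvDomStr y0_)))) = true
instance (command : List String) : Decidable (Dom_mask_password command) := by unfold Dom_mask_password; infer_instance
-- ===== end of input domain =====

-- B replaces A's boolean mask_next flag with an index-style loop that consumes a
-- flag together with its following password value in one step (alternative decomposition).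


-- ===== PORT A =====
-- A's loop body: state (masked, mask_next), exactly the two branches of the Python for-loop
def maskStepA (st : List String × Bool) (part : String) : List String × Bool :=
  if st.2 then (st.1 ++ ["******"], false)
  else (st.1 ++ [part],
        decide (part ∈ ["--sourcepassword", "--targetpassword", "-x", "-X"]))

-- for-loop over parts with accumulator (masked, mask_next), transliterated as foldl
def mask_password (command : List String) : List String :=
  (command.foldl maskStepA ([], false)).1

-- ===== PORT B =====
-- Source B's while loop consumes one token, or a flag plus its value, per step;
-- transcribed as structural recursion consuming one or two list elements.
def mask_password_alt (command : List String) : List String :=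
  match command with
  | [] => []
  | part :: rest =>
    if part ∈ ["--sourcepassword", "--targetpassword", "-x", "-X"] then
      match rest with
      | [] => [part]
      | _ :: rest' => part :: "******" :: mask_password_alt rest'
    else part :: mask_password_alt rest

-- ===== PRECONDITION & SPEC =====
def Spec_mask_password (command : List String) (out : List String) : Prop := out = mask_password_alt command
instance (command : List String) (out : List String) : Decidable (Spec_mask_password command out) := by unfold Spec_mask_password; infer_instance

-- ===== CLAIM (what is proved, stated in full; the proofs are below) =====
def Claim_equal_mask_password : Prop := ∀ (command : List String), Dom_mask_password command → Spec_mask_password command (mask_password command)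

-- ===== LEMMAS AND PROOFS =====

-- A's loop body as direct recursion on the remaining list and the flag state
def maskAux : List String → Bool → List String
  | [], _ => []
  | _ :: r, true => "******" :: maskAux r false
  | x :: r, false =>
      x :: maskAux r (decide (x ∈ ["--sourcepassword", "--targetpassword", "-x", "-X"]))

theorem foldl_eq_maskAux (l : List String) (acc : List String) (b : Bool) :
    (l.foldl maskStepA (acc, b)).1 = acc ++ maskAux l b := by
  induction l generalizing acc b with
  | nil => simp [maskAux]
  | cons x r ih =>
    cases b with
    | true => simp [List.foldl_cons, maskStepA, maskAux, ih]
    | false => simp [List.foldl_cons, maskStepA, maskAux, ih]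

theorem maskAux_eq_alt : ∀ n l, l.length ≤ n → maskAux l false = mask_password_alt l := by
  intro n
  induction n with
  | zero =>
    intro l h
    cases l with
    | nil => rfl
    | cons x r => simp at h
  | succ n ih =>
    intro l h
    cases l with
    | nil => rfl
    | cons x r =>
      by_cases hx : x ∈ ["--sourcepassword", "--targetpassword", "-x", "-X"]
      · cases r with
        | nil => simp [maskAux, mask_password_alt, hx]
        | cons y r' =>
          have hr : maskAux r' false = mask_password_alt r' := by
            apply ih; simp at h ⊢; omega
          simp [maskAux, mask_password_alt, hx, hr]
      · have hr : maskAux r false = mask_password_alt r := by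
          apply ih; simp at h ⊢; omega
        conv_rhs => rw [mask_password_alt.eq_def]
        simp [maskAux, hx, hr]

-- ===== VERDICT (by name: the statement is the Claim_ definition above) =====
theorem mask_password_spec : Claim_equal_mask_password := by
  intro command _
  unfold Spec_mask_password mask_password
  rw [foldl_eq_maskAux, maskAux_eq_alt command.length command le_rfl]
  simp
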